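-- pv_equiv track=rewrite | github.com/EgorLakomkin/sentiment_reviews | topic_server.py | merge_topic_info
-- ===== SOURCE A (Python) =====
-- def merge_topic_info(lst_topic_info):
--     """
--
--     :param lst_topic_info:
--     :return:
--     """
--     topic_info_dict = {}
--     for info in lst_topic_info:
--         topic_name = info["topic"]
--         if topic_name not in topic_info_dict:
--             topic_info_dict[ topic_name ] = {
--                 "topic_aspects" : []
--             }
--         topic_info_dict[ topic_name ][ "topic_aspects" ].append( info )
--     return topic_info_dict
-- ===== SOURCE B (Python) =====
-- def merge_topic_info(lst_topic_info):
--     """Two-pass grouping: collect the distinct topic names in first-occurrence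
--     order, then build each group by filtering the input list once per topic."""
--     topics = dict.fromkeys(info["topic"] for info in lst_topic_info)
--     return {
--         topic: {"topic_aspects": [info for info in lst_topic_info if info["topic"] == topic]}
--         for topic in topics
--     }
-- ===== Notes on version B (the rewrite author's own statement) =====
-- stated objective: simpler
-- what changed: Replaces A's single mutating dict-accumulation pass (create-entry-if-missing, then append) by a two-pass comprehension: collect the distinct topic names in first-occurrence order with dict.fromkeys, then build each group's aspect list by filtering the input once per topic.
import Mathlib
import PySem

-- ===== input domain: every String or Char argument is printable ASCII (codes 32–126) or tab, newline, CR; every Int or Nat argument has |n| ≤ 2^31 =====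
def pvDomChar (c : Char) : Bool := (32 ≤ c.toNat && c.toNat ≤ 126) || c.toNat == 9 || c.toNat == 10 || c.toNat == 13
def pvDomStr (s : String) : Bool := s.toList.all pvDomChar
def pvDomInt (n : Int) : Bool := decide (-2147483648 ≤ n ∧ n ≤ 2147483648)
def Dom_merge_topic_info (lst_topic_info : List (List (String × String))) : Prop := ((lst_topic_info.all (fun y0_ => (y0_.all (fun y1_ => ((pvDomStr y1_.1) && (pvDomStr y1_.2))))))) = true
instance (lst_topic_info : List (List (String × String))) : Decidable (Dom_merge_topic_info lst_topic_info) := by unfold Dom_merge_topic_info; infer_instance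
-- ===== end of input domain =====

-- B groups by collecting the distinct topic names first and then filtering the list once per
-- topic (simpler decomposition, same return value); not claimed faster.

-- info["topic"] — first-match lookup in the association list (Pre_ guarantees the key exists;
-- the `.getD ""` default is never reached on Pre_ inputs). Shared by both ports because both
-- Pythons access the key the same way.
def pvTopic (info : List (String × String)) : String :=
  (List.lookup "topic" info).getD ""

-- ===== PORT A =====
-- literal transliteration of A: one dict-accumulation pass, then the dict rendered as items
def merge_topic_info (lst_topic_info : List (List (String × String))) : List (String × List (String × List (List (String × String)))) :=
  (lst_topic_info.foldl
    (fun d info =>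
      let topic_name := pvTopic info
      let d := if d.contains topic_name then d
               else d.insert topic_name (PySem.Dict.mk [("topic_aspects", ([] : List (List (String × String))))])
      d.modify topic_name (PySem.Dict.mk []) (fun inner =>
        inner.modify "topic_aspects" [] (fun l => l ++ [info])))
    PySem.Dict.empty).items.map (fun p => (p.1, p.2.items))

-- ===== PORT B =====
-- transliteration of Source B: dict.fromkeys = ordered dedup, then one filter per distinct topic
def merge_topic_info_alt (lst_topic_info : List (List (String × String))) : List (String × List (String × List (List (String × String)))) :=
  let topics := PySem.List.dedup (lst_topic_info.map pvTopic)
  topics.map (fun t =>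
    (t, [("topic_aspects", lst_topic_info.filter (fun info => pvTopic info == t))]))

-- ===== PRECONDITION & SPEC =====
-- Pre_ excludes exactly the inputs where some entry lacks the "topic" key, on which A raises KeyError.
def Pre_merge_topic_info (lst_topic_info : List (List (String × String))) : Prop :=
  lst_topic_info.all (fun info => (List.lookup "topic" info).isSome) = true
instance (lst_topic_info : List (List (String × String))) : Decidable (Pre_merge_topic_info lst_topic_info) := by unfold Pre_merge_topic_info; infer_instance
def pvWitness_merge_topic_info : (List (List (String × String))) :=
  [[("topic", "a"), ("k", "v")], [("topic", "b")], [("topic", "a")]]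

def Spec_merge_topic_info (lst_topic_info : List (List (String × String))) (out : List (String × List (String × List (List (String × String))))) : Prop := out = merge_topic_info_alt lst_topic_info
instance (lst_topic_info : List (List (String × String))) (out : List (String × List (String × List (List (String × String))))) : Decidable (Spec_merge_topic_info lst_topic_info out) := by
  unfold Spec_merge_topic_info
  haveI h1 : DecidableEq (List (String × List (List (String × String)))) := inferInstance
  haveI h2 : DecidableEq (String × List (String × List (List (String × String)))) := inferInstance
  haveI h3 : DecidableEq (List (String × List (String × List (List (String × String))))) := inferInstance
  exact h3 out (merge_topic_info_alt lst_topic_info)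

-- ===== CLAIM (what is proved, stated in full; the proofs are below) =====
def Claim_equal_merge_topic_info : Prop := ∀ (lst_topic_info : List (List (String × String))), Dom_merge_topic_info lst_topic_info → Pre_merge_topic_info lst_topic_info → Spec_merge_topic_info lst_topic_info (merge_topic_info lst_topic_info)

-- ===== LEMMAS AND PROOFS =====

-- the accumulating dict after processing l, written in B's shape
def pvState (l : List (List (String × String))) : PySem.Dict String (PySem.Dict String (List (List (String × String)))) :=
  PySem.Dict.mk ((PySem.List.dedup (l.map pvTopic)).map (fun t =>
    (t, PySem.Dict.mk [("topic_aspects", l.filter (fun info => pvTopic info == t))])))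

lemma pvState_keys (l : List (List (String × String))) :
    (pvState l).keys = PySem.List.dedup (l.map pvTopic) := by
  simp [pvState, PySem.Dict.keys_mk, List.map_map, Function.comp_def]

lemma foldA_eq (l : List (List (String × String))) :
    l.foldl
      (fun d info =>
        let topic_name := pvTopic info
        let d := if d.contains topic_name then d
                 else d.insert topic_name (PySem.Dict.mk [("topic_aspects", ([] : List (List (String × String))))])
        d.modify topic_name (PySem.Dict.mk []) (fun inner =>
          inner.modify "topic_aspects" [] (fun l => l ++ [info])))
      PySem.Dict.empty
    = pvState l := by
  induction l using List.reverseRecOn with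
  | nil => rfl
  | append_singleton l x ih =>
    rw [List.foldl_append, List.foldl_cons, List.foldl_nil, ih]
    have hkeys : (pvState l).keys = PySem.Set.ofList (l.map pvTopic) := pvState_keys l
    have hnd : (pvState l).keys.Nodup := by rw [hkeys]; exact PySem.Set.nodup_ofList _
    have hcont : (pvState l).contains (pvTopic x) =
        decide (pvTopic x ∈ PySem.Set.ofList (l.map pvTopic)) := by
      rw [PySem.Dict.contains_eq_decide_mem_keys, hkeys]
    have hrhs : PySem.List.dedup (l.map pvTopic ++ [x].map pvTopic)
        = PySem.Set.add (PySem.Set.ofList (l.map pvTopic)) (pvTopic x) := by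
      rw [List.map_singleton, PySem.List.dedup_eq_ofList,
        PySem.Set.ofList_append, PySem.Set.update_cons, PySem.Set.update_nil]
    by_cases h : pvTopic x ∈ PySem.Set.ofList (l.map pvTopic)
    · -- topic already present: no insert, the entry for it gets x appended
      have hmem : (pvTopic x,
          PySem.Dict.mk [("topic_aspects", l.filter (fun info => pvTopic info == pvTopic x))])
          ∈ (pvState l).items := by
        simp only [pvState]
        exact List.mem_map.2 ⟨pvTopic x, h, rfl⟩
      have hgetD := PySem.Dict.getD_of_mem_items (pvState l) hmem hnd (PySem.Dict.mk [])
      have hadd : PySem.Set.add (PySem.Set.ofList (l.map pvTopic)) (pvTopic x)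
          = PySem.Set.ofList (l.map pvTopic) := by
        simp [PySem.Set.add, h]
      simp only [hcont, h, decide_true, if_true, PySem.Dict.modify, hgetD]
      apply PySem.Dict.ext
      rw [PySem.Dict.items_insert_of_contains _ _ (by rw [hcont]; simp [h])]
      simp only [pvState, List.map_append, hrhs, hadd, List.map_map]
      apply List.map_congr_left
      intro t' _
      by_cases ht : t' = pvTopic x
      · subst ht
        simp [PySem.Dict.insert, PySem.Dict.contains,
          PySem.Dict.getD, PySem.Dict.get?, List.filter_append, pvTopic]
      · have : (t' == pvTopic x) = false := by simp [ht]
        have hx : (pvTopic x == t') = false := by simp [Ne.symm ht]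
        simp [hx, ht, List.filter_append]
    · -- fresh topic: appended at the end with its singleton aspect list
      have hne : ∀ t' ∈ PySem.Set.ofList (l.map pvTopic), t' ≠ pvTopic x := by
        intro t' ht' he; exact h (he ▸ ht')
      have hfilt : l.filter (fun info => pvTopic info == pvTopic x) = [] := by
        rw [List.filter_eq_nil_iff]
        intro i hi hb
        exact h ((PySem.Set.mem_ofList _ _).2 (List.mem_map.2 ⟨i, hi, by simpa using hb⟩))
      have hc0 : (pvState l).contains (pvTopic x) = false := by rw [hcont]; simp [h]
      have hadd : PySem.Set.add (PySem.Set.ofList (l.map pvTopic)) (pvTopic x)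
          = PySem.Set.ofList (l.map pvTopic) ++ [pvTopic x] := by
        simp [PySem.Set.add, h]
      have hitems1 : ((pvState l).insert (pvTopic x)
          (PySem.Dict.mk [("topic_aspects", ([] : List (List (String × String))))])).items
          = (pvState l).items ++ [(pvTopic x, PySem.Dict.mk [("topic_aspects", [])])] :=
        PySem.Dict.items_insert_of_not_contains _ _ hc0
      have hmem1 : (pvTopic x, PySem.Dict.mk [("topic_aspects", ([] : List (List (String × String))))])
          ∈ ((pvState l).insert (pvTopic x) (PySem.Dict.mk [("topic_aspects", [])])).items := by
        rw [hitems1]; exact List.mem_append_right _ (List.mem_singleton.2 rfl)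
      have hnd1 : ((pvState l).insert (pvTopic x)
          (PySem.Dict.mk [("topic_aspects", ([] : List (List (String × String))))])).keys.Nodup := by
        have := PySem.Dict.nodup_keys_insert (pvState l) (pvTopic x)
          (PySem.Dict.mk [("topic_aspects", [])]) hnd
        exact this
      have hgetD := PySem.Dict.getD_of_mem_items _ hmem1 hnd1 (PySem.Dict.mk [])
      simp only [hc0, Bool.false_eq_true, if_false, PySem.Dict.modify, hgetD]
      apply PySem.Dict.ext
      rw [PySem.Dict.items_insert_of_contains _ _ (by
        simp [PySem.Dict.contains, hitems1])]
      rw [hitems1]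
      simp only [pvState, List.map_append, hrhs, hadd, List.map_map]
      congr 1
      · apply List.map_congr_left
        intro t' ht'
        have h1 : (t' == pvTopic x) = false := by simp [hne t' ht']
        have h2 : (pvTopic x == t') = false := by simp [Ne.symm (hne t' ht')]
        simp [h2, hne t' ht', List.filter_append]
      · simp [PySem.Dict.insert, PySem.Dict.contains,
          PySem.Dict.getD, PySem.Dict.get?, List.filter_append, hfilt]

lemma merge_eq_alt (l : List (List (String × String))) :
    merge_topic_info l = merge_topic_info_alt l := by
  rw [merge_topic_info, foldA_eq]
  simp [pvState, merge_topic_info_alt, List.map_map, Function.comp]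

-- ===== VERDICT (by name: the statement is the Claim_ definition above) =====
theorem merge_topic_info_spec : Claim_equal_merge_topic_info := by
  intro l _ _
  exact merge_eq_alt l
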